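-- pv_equiv track=rewrite | github.com/Jack-cpu666/refracting | app.py | _find_main_file
-- ===== SOURCE A (Python) =====
-- from typing import Dict, List, Set, Tuple, Optional, Any, Union, Type, Callable
--
-- def _find_main_file(files: Dict[str, str]) -> str:
--     """Find the main entry point."""
--     # Common entry points
--     for name in ['main.py', 'app.py', 'application.py', '__main__.py', 'run.py', 'server.py']:
--         for filename in files:
--             if filename.endswith(name):
--                 return filename
--
--     # Find file with if __name__ == "__main__":
--     for filename, content in files.items():
--         if filename.endswith('.py') and 'if __name__ == "__main__":' in content:
--             return filename
--
--     # Return largest Python file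
--     py_files = [(f, len(c)) for f, c in files.items() if f.endswith('.py')]
--     if py_files:
--         return max(py_files, key=lambda x: x[1])[0]
--
--     return list(files.keys())[0]
-- ===== SOURCE B (Python) =====
-- _PRIORITY = ['main.py', 'app.py', 'application.py', '__main__.py', 'run.py', 'server.py']
--
--
-- def _rank(filename):
--     """Index of the first priority name that filename ends with, else None."""
--     j = 0
--     for name in _PRIORITY:
--         if filename.endswith(name):
--             return j
--         j += 1
--     return None
--
--
-- def _find_main_file(files):
--     """Find the main entry point."""
--     # Single pass: keep the best (lowest) name-priority rank; strict '<' keeps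
--     # the earliest file in dict order on equal ranks.
--     best_rank, best_name = None, None
--     for filename in files:
--         r = _rank(filename)
--         if r is not None and (best_rank is None or r < best_rank):
--             best_rank, best_name = r, filename
--     if best_name is not None:
--         return best_name
--
--     # Find file with if __name__ == "__main__":
--     for filename, content in files.items():
--         if filename.endswith('.py') and 'if __name__ == "__main__":' in content:
--             return filename
--
--     # Return largest Python file
--     py_files = [(f, len(c)) for f, c in files.items() if f.endswith('.py')]
--     if py_files:
--         return max(py_files, key=lambda x: x[1])[0]
--
--     return list(files.keys())[0]
-- ===== Notes on version B (the rewrite author's own statement) =====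
-- stated objective: alternative
-- what changed: Phase 1's six per-priority-name scans over the files are replaced by a single pass over the filenames that keeps the candidate with the lowest priority rank (computed by a _rank helper), with strict '<' so the earliest file in dict order wins ties; the __main__-guard scan, largest-file and first-key fallbacks are unchanged.
-- outside the precondition, e.g. on _find_main_file({}): A raises IndexError, B raises IndexError
import Mathlib
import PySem

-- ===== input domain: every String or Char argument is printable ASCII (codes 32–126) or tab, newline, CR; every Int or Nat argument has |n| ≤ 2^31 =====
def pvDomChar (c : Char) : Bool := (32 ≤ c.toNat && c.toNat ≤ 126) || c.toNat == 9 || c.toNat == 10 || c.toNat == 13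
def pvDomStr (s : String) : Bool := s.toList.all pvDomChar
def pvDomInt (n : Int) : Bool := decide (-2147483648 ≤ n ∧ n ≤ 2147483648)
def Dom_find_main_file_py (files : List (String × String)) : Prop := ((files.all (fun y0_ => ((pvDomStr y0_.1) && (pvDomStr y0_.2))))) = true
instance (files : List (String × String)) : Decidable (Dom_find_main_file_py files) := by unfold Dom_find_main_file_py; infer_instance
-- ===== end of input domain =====

-- B replaces A's six scans of the files (one per priority name) by a single pass keeping
-- the lowest-ranked candidate (objective: alternative decomposition, same linear cost).

-- Shared constants and the identical tail phases (__main__-guard scan, largest .py file,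
-- first-key fallback) — this code is the same in Source A and Source B.
def pvPriority : List String := ["main.py", "app.py", "application.py", "__main__.py", "run.py", "server.py"]

def pvMainGuard : String := "if __name__ == \"__main__\":"

def pvTail (files : List (String × String)) : String :=
  match files.find? (fun p => PySem.Str.endswith p.1 ".py" && PySem.Str.isIn pvMainGuard p.2) with
  | some p => p.1
  | none =>
    let py_files := (files.filter (fun p => PySem.Str.endswith p.1 ".py")).map
      (fun p => (p.1, (PySem.Str.len p.2 : Int)))
    match PySem.List.max? py_files (fun x => x.2) with
    | some m => m.1
    | none => (files.map Prod.fst).headD ""   -- list(files.keys())[0]; empty files is outside Pre_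

-- ===== PORT A =====
-- phase 1 of A: for each priority name in order, return the first filename ending with it
def pvPhaseA (names : List String) (files : List (String × String)) : Option String :=
  match names with
  | [] => none
  | n :: ns =>
    match files.find? (fun p => PySem.Str.endswith p.1 n) with
    | some p => some p.1
    | none => pvPhaseA ns files

def find_main_file_py (files : List (String × String)) : String :=
  match pvPhaseA pvPriority files with
  | some f => f
  | none => pvTail files

-- ===== PORT B =====
-- _rank: index of the first priority name the filename ends with
def pvRankAux (filename : String) (names : List String) (j : Nat) : Option Nat :=
  match names with
  | [] => none
  | n :: ns => if PySem.Str.endswith filename n then some j else pvRankAux filename ns (j + 1)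

-- B's single loop over the files, keeping the best (lowest-rank, earliest) candidate
def pvBestLoop (names : List String) (files : List (String × String))
    (best : Option (Nat × String)) : Option (Nat × String) :=
  match files with
  | [] => best
  | (f, _) :: rest =>
    match pvRankAux f names 0 with
    | none => pvBestLoop names rest best
    | some r =>
      match best with
      | none => pvBestLoop names rest (some (r, f))
      | some (br, bf) =>
        if r < br then pvBestLoop names rest (some (r, f))
        else pvBestLoop names rest (some (br, bf))

def find_main_file_py_alt (files : List (String × String)) : String :=
  match pvBestLoop pvPriority files none with
  | some (_, f) => f
  | none => pvTail files

-- ===== PRECONDITION & SPEC =====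
-- Pre_ excludes only the empty dict, on which Python A raises IndexError at list(files.keys())[0].
def Pre_find_main_file_py (files : List (String × String)) : Prop := files ≠ []
instance (files : List (String × String)) : Decidable (Pre_find_main_file_py files) := by
  unfold Pre_find_main_file_py; infer_instance

def pvWitness_find_main_file_py : (List (String × String)) := [("app.py", "")]

def Spec_find_main_file_py (files : List (String × String)) (out : String) : Prop := out = find_main_file_py_alt files
instance (files : List (String × String)) (out : String) : Decidable (Spec_find_main_file_py files out) := by unfold Spec_find_main_file_py; infer_instance

-- ===== CLAIM (what is proved, stated in full; the proofs are below) =====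
def Claim_equal_find_main_file_py : Prop := ∀ (files : List (String × String)), Dom_find_main_file_py files → Pre_find_main_file_py files → Spec_find_main_file_py files (find_main_file_py files)

-- ===== LEMMAS AND PROOFS =====

theorem pvRankAux_succ (f : String) (names : List String) (j : Nat) :
    pvRankAux f names (j + 1) = (pvRankAux f names j).map (· + 1) := by
  induction names generalizing j with
  | nil => simp [pvRankAux]
  | cons n ns ih =>
    simp only [pvRankAux]
    by_cases h : PySem.Chars.endswith f.toList n.toList
    · simp [h]
    · simp [h, ih]

theorem pvBestLoop_nil (files : List (String × String)) (acc : Option (Nat × String)) :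
    pvBestLoop [] files acc = acc := by
  induction files generalizing acc with
  | nil => rfl
  | cons p rest ih => simpa [pvBestLoop, pvRankAux] using ih acc

theorem pvBestLoop_zero (names : List String) (files : List (String × String)) (bf : String) :
    pvBestLoop names files (some (0, bf)) = some (0, bf) := by
  induction files with
  | nil => rfl
  | cons p rest ih =>
    obtain ⟨f, c⟩ := p
    simp only [pvBestLoop]
    cases h : pvRankAux f names 0 with
    | none => exact ih
    | some r => simpa using ih

theorem pvBestLoop_cons (n : String) (ns : List String) (files : List (String × String))
    (acc : Option (Nat × String)) :
    pvBestLoop (n :: ns) files (acc.map (fun q => (q.1 + 1, q.2))) =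
      match files.find? (fun p => PySem.Str.endswith p.1 n) with
      | some p => some (0, p.1)
      | none => (pvBestLoop ns files acc).map (fun q => (q.1 + 1, q.2)) := by
  induction files generalizing acc with
  | nil => simp [pvBestLoop]
  | cons p rest ih =>
    obtain ⟨f, c⟩ := p
    by_cases h : PySem.Chars.endswith f.toList n.toList
    · -- f matches n: rank 0, candidate wins and sticks
      have hr : pvRankAux f (n :: ns) 0 = some 0 := by simp [pvRankAux, h]
      simp only [List.find?, pvBestLoop, hr]
      cases acc with
      | none => simp [h, pvBestLoop_zero]
      | some q => simp [h, pvBestLoop_zero]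
    · have hb : PySem.Chars.endswith f.toList n.toList = false := by
        simpa using h
      have hr : pvRankAux f (n :: ns) 0 = (pvRankAux f ns 0).map (· + 1) := by
        simp [pvRankAux, hb, pvRankAux_succ]
      simp only [List.find?, pvBestLoop, hr]
      cases hrn : pvRankAux f ns 0 with
      | none => simpa [hb] using ih acc
      | some r =>
        cases acc with
        | none => simpa [hb] using ih (some (r, f))
        | some q =>
          obtain ⟨br, bs⟩ := q
          by_cases hlt : r < br
          · have h1 : r + 1 < br + 1 := by omega
            simpa [hb, hlt, h1] using ih (some (r, f))
          · have h1 : ¬ r + 1 < br + 1 := by omega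
            simpa [hb, hlt, h1] using ih (some (br, bs))

theorem pvPhaseA_eq_bestLoop (names : List String) (files : List (String × String)) :
    pvPhaseA names files = (pvBestLoop names files none).map Prod.snd := by
  induction names with
  | nil => simp [pvPhaseA, pvBestLoop_nil]
  | cons n ns ih =>
    have h := pvBestLoop_cons n ns files none
    simp only [Option.map_none] at h
    simp only [pvPhaseA, h]
    cases hf : files.find? (fun p => PySem.Str.endswith p.1 n) with
    | some p => simp
    | none => simp [ih, Option.map_map]; rfl

-- ===== VERDICT (by name: the statement is the Claim_ definition above) =====
theorem find_main_file_py_spec : Claim_equal_find_main_file_py := by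
  intro files _ _
  unfold Spec_find_main_file_py find_main_file_py find_main_file_py_alt
  rw [pvPhaseA_eq_bestLoop]
  cases h : pvBestLoop pvPriority files none with
  | none => simp
  | some q => obtain ⟨r, f⟩ := q; simp
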